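-- pv_equiv track=rewrite | github.com/austinberard/advent-of-code | day-09.py | find_free_space
-- ===== SOURCE A (Python) =====
-- def get_length_of_space(index, list_to_check):
--     val_to_look_for = list_to_check[index]
--     cur_index = index
--     size = 0
--     while True:
--         try:
--             if list_to_check[cur_index] != val_to_look_for:
--                 break
--         except IndexError:
--             break
--         size += 1
--         cur_index += 1
--     return size
--
-- def find_free_space(index_of_to_insert, list_to_check):
--     curr_index = 0
--     while True:
--         try:
--             next_available_slot = curr_index + list_to_check[curr_index:index_of_to_insert].index(-1)
--         except ValueError:
--             return -1
--         size_of_slot = get_length_of_space(next_available_slot, list_to_check)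
--         size_of_data = get_length_of_space(index_of_to_insert, list_to_check)
--         if size_of_data > size_of_slot:
--             curr_index = next_available_slot + 1
--             continue
--         return next_available_slot
-- ===== SOURCE B (Python) =====
-- def find_free_space(index_of_to_insert, list_to_check):
--     n = len(list_to_check)
--     if index_of_to_insert >= 0:
--         stop = min(index_of_to_insert, n)
--     else:
--         stop = n + index_of_to_insert
--     data = None
--     j = 0
--     while j < stop:
--         if list_to_check[j] != -1:
--             j += 1
--             continue
--         if data is None:
--             val = list_to_check[index_of_to_insert]
--             data = 1
--             while index_of_to_insert + data < n and list_to_check[index_of_to_insert + data] == val: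
--                 data += 1
--         run = 1
--         while j + run < n and list_to_check[j + run] == -1:
--             run += 1
--         if run >= data:
--             return j
--         j += run
--     return -1
-- ===== Notes on version B (the rewrite author's own statement) =====
-- stated objective: alternative
-- what changed: B does a single left-to-right index scan that skips each too-small -1 run in one jump and computes the data-block length at most once (lazily, at the first free slot), instead of A's loop that re-slices the list, re-searches it with .index and recomputes both run lengths from scratch after every failed slot; B avoids A's quadratic re-scanning but trades C-level slice/.index primitives for explicit index loops.
import Mathlib
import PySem

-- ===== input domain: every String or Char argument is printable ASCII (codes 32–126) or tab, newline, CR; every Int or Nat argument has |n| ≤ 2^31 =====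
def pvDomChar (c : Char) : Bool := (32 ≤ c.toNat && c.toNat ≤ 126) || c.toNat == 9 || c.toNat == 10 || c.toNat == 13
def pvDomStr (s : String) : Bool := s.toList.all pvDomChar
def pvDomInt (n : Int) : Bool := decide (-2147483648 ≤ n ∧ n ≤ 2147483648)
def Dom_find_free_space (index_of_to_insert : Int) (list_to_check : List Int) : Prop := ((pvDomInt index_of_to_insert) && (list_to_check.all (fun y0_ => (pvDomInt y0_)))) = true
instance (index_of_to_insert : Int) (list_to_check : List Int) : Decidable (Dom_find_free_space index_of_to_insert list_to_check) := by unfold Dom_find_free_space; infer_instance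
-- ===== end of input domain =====

-- B computes the data-block length at most once (lazily, at the first free slot) and does a
-- single left-to-right scan skipping each too-small -1 run in one jump, instead of A's repeated
-- slice/.index/recompute loop (objective: alternative).


-- ===== PORT A =====
-- The loops below carry a Nat fuel that only makes the recursion structural; every call site
-- passes more fuel than the loop can consume, so the fuel-0 branch is never reached.

-- the 'while True' of get_length_of_space: pyGet? = none is exactly the caught IndexError
def pvRunLoopA (val0 : Int) (l : List Int) (cur size : Int) : Nat → Int
  | 0 => size
  | fuel + 1 =>
    match PySem.List.pyGet? l cur with
    | none => size
    | some v => if v ≠ val0 then size else pvRunLoopA val0 l (cur + 1) (size + 1) fuel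

def get_length_of_space (index : Int) (list_to_check : List Int) : Int :=
  match PySem.List.pyGet? list_to_check index with
  | none => 0   -- Python raises an uncaught IndexError here; such inputs are outside Pre_
  | some v => pvRunLoopA v list_to_check index 0 (2 * list_to_check.length + 1)

-- the 'while True' of find_free_space: index? = none is exactly the caught ValueError
def pvFindLoopA (index_of_to_insert : Int) (l : List Int) (curr : Int) : Nat → Int
  | 0 => -1
  | fuel + 1 =>
    match PySem.List.index? (PySem.List.slice l (some curr) (some index_of_to_insert)) (-1) with
    | none => -1
    | some k =>
        if get_length_of_space index_of_to_insert l > get_length_of_space (curr + (k : Int)) l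
        then pvFindLoopA index_of_to_insert l (curr + (k : Int) + 1) fuel
        else curr + (k : Int)

def find_free_space (index_of_to_insert : Int) (list_to_check : List Int) : Int :=
  pvFindLoopA index_of_to_insert list_to_check 0 (list_to_check.length + 1)

-- ===== PORT B =====
-- Source B inner run-length loop 'while i + d < n and l[i+d] == v: d += 1' (shared by the data loop
-- and the run loop, which are the same loop on different values); pyGet? wraps negative indices
-- exactly as Python does
def pvAltRunLen (l : List Int) (v : Int) (i : Int) (d : Int) : Nat → Int
  | 0 => d
  | fuel + 1 =>
    if i + d < (l.length : Int) ∧ PySem.List.pyGet? l (i + d) = some v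
    then pvAltRunLen l v i (d + 1) fuel else d

-- Source B outer loop 'while j < stop: …' with the lazily computed data length as 'dataOpt'
def pvAltScan (l : List Int) (iIns stop : Int) (dataOpt : Option Int) (j : Int) : Nat → Int
  | 0 => -1
  | fuel + 1 =>
    if j < stop then
      if PySem.List.pyGet? l j ≠ some (-1) then pvAltScan l iIns stop dataOpt (j + 1) fuel
      else
        match dataOpt with
        | some dat =>
            if dat ≤ pvAltRunLen l (-1) j 1 (2 * l.length + 1) then j
            else pvAltScan l iIns stop (some dat) (j + pvAltRunLen l (-1) j 1 (2 * l.length + 1)) fuel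
        | none =>
            match PySem.List.pyGet? l iIns with
            | none => 0   -- Source B raises IndexError computing val here; such inputs are outside Pre_
            | some val =>
                if pvAltRunLen l val iIns 1 (2 * l.length + 1) ≤ pvAltRunLen l (-1) j 1 (2 * l.length + 1) then j
                else pvAltScan l iIns stop (some (pvAltRunLen l val iIns 1 (2 * l.length + 1)))
                  (j + pvAltRunLen l (-1) j 1 (2 * l.length + 1)) fuel
    else -1

def find_free_space_alt (index_of_to_insert : Int) (list_to_check : List Int) : Int :=
  let stop : Int :=
    if 0 ≤ index_of_to_insert then min index_of_to_insert (list_to_check.length : Int)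
    else (list_to_check.length : Int) + index_of_to_insert
  pvAltScan list_to_check index_of_to_insert stop none 0 (stop.toNat + 1)

-- ===== PRECONDITION & SPEC =====
-- Pre_ is exactly the set of inputs on which Python A returns normally: A raises IndexError
-- (reading list_to_check[index_of_to_insert] in get_length_of_space) precisely when the index is
-- out of range AND a -1 occurs in the searched window list_to_check[0:index_of_to_insert];
-- B raises on exactly the same inputs.
def Pre_find_free_space (index_of_to_insert : Int) (list_to_check : List Int) : Prop :=
  (-(list_to_check.length : Int) ≤ index_of_to_insert ∧ index_of_to_insert < (list_to_check.length : Int))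
  ∨ (-1 : Int) ∉ PySem.List.slice list_to_check (some 0) (some index_of_to_insert)
instance (index_of_to_insert : Int) (list_to_check : List Int) : Decidable (Pre_find_free_space index_of_to_insert list_to_check) := by unfold Pre_find_free_space; infer_instance

def pvWitness_find_free_space : Int × List Int := (1, [-1, 5])

def Spec_find_free_space (index_of_to_insert : Int) (list_to_check : List Int) (out : Int) : Prop := out = find_free_space_alt index_of_to_insert list_to_check
instance (index_of_to_insert : Int) (list_to_check : List Int) (out : Int) : Decidable (Spec_find_free_space index_of_to_insert list_to_check out) := by unfold Spec_find_free_space; infer_instance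

-- ===== CLAIM (what is proved, stated in full; the proofs are below) =====
def Claim_equal_find_free_space : Prop := ∀ (index_of_to_insert : Int) (list_to_check : List Int), Dom_find_free_space index_of_to_insert list_to_check → Pre_find_free_space index_of_to_insert list_to_check → Spec_find_free_space index_of_to_insert list_to_check (find_free_space index_of_to_insert list_to_check)

-- ===== LEMMAS AND PROOFS =====

theorem pv_pyGet?_some_lt {α : Type} {l : List α} {i : Int} {v : α}
    (h : PySem.List.pyGet? l i = some v) : i < (l.length : Int) := by
  by_contra hge
  have hn : PySem.List.pyGet? l i = none := by
    rw [PySem.List.pyGet?_eq_none_iff]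
    unfold PySem.Raise.InRange
    omega
  simp [hn] at h

theorem pv_pyGet?_some_ge {α : Type} {l : List α} {i : Int} {v : α}
    (h : PySem.List.pyGet? l i = some v) : -(l.length : Int) ≤ i := by
  by_contra hge
  have hn : PySem.List.pyGet? l i = none := by
    rw [PySem.List.pyGet?_eq_none_iff]
    unfold PySem.Raise.InRange
    omega
  simp [hn] at h

-- for a non-negative start the found slot itself lies inside the list
theorem pv_index?_slice_slot_lt {l : List Int} {curr i : Int} {k : Nat} (hc : 0 ≤ curr)
    (h : PySem.List.index? (PySem.List.slice l (some curr) (some i)) (-1) = some k) :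
    curr + (k : Int) < (l.length : Int) := by
  obtain ⟨hk, -, -⟩ := PySem.List.getElem_of_index?_eq_some h
  rw [PySem.List.length_slice] at hk
  have h2 := PySem.List.clampIdx_le l.length i
  unfold PySem.List.clampIdx at hk
  split_ifs at hk <;> omega

-- reference run length: number of consecutive positions ≥ p holding v (0 at the end / on mismatch)
def pvRunX (l : List Int) (v : Int) (p : Int) : Int :=
  if h : PySem.List.pyGet? l p = some v then 1 + pvRunX l v (p + 1) else 0
termination_by ((l.length : Int) - p).toNat
decreasing_by
  have := pv_pyGet?_some_lt h
  omega

theorem pvRunX_nonneg (l : List Int) (v : Int) (p : Int) : 0 ≤ pvRunX l v p := by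
  rw [pvRunX]
  split
  · have := pvRunX_nonneg l v (p + 1)
    omega
  · omega
termination_by ((l.length : Int) - p).toNat
decreasing_by
  rename_i h
  have := pv_pyGet?_some_lt h
  omega

theorem pvRunX_succ (l : List Int) (v : Int) (p : Int)
    (hg : PySem.List.pyGet? l p = some v) : pvRunX l v p = 1 + pvRunX l v (p + 1) := by
  rw [pvRunX]
  simp [hg]

theorem pvRunX_zero (l : List Int) (v : Int) (p : Int)
    (h : ¬ PySem.List.pyGet? l p = some v) : pvRunX l v p = 0 := by
  rw [pvRunX]
  simp [h]

theorem pvRunX_pos (l : List Int) (v : Int) (p : Int)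
    (h1 : 0 < pvRunX l v p) : PySem.List.pyGet? l p = some v := by
  by_contra hc
  have hx : pvRunX l v p = 0 := pvRunX_zero _ _ _ hc
  omega

theorem pvRunLoopA_eq (l : List Int) (v : Int) :
    ∀ (fuel : Nat) (cur size : Int), ((l.length : Int) - cur).toNat < fuel →
      pvRunLoopA v l cur size fuel = size + pvRunX l v cur := by
  intro fuel
  induction fuel with
  | zero => omega
  | succ f IH =>
      intro cur size hfuel
      show (match PySem.List.pyGet? l cur with
            | none => size
            | some w => if w ≠ v then size else pvRunLoopA v l (cur + 1) (size + 1) f)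
          = size + pvRunX l v cur
      cases hg : PySem.List.pyGet? l cur with
      | none =>
          have hx : pvRunX l v cur = 0 := pvRunX_zero _ _ _ (by simp [hg])
          simp [hx]
      | some w =>
          by_cases hw : w = v
          · subst hw
            have hlt := pv_pyGet?_some_lt hg
            rw [pvRunX_succ l w cur hg]
            have hrec := IH (cur + 1) (size + 1) (by omega)
            simp only [ne_eq, not_true_eq_false, if_false]
            rw [hrec]
            omega
          · have hx : pvRunX l v cur = 0 := pvRunX_zero _ _ _ (by simp [hg, hw])
            simp [hx, hw]

theorem pvAltRunLen_eq (l : List Int) (v : Int) :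
    ∀ (fuel : Nat) (i d : Int), ((l.length : Int) - (i + d)).toNat < fuel →
      pvAltRunLen l v i d fuel = d + pvRunX l v (i + d) := by
  intro fuel
  induction fuel with
  | zero => omega
  | succ f IH =>
      intro i d hfuel
      show (if i + d < (l.length : Int) ∧ PySem.List.pyGet? l (i + d) = some v
            then pvAltRunLen l v i (d + 1) f else d) = d + pvRunX l v (i + d)
      split
      · rename_i h
        rw [pvRunX_succ l v (i + d) h.2]
        have hrec := IH i (d + 1) (by omega)
        rw [hrec]
        have harg : i + (d + 1) = i + d + 1 := by omega
        rw [harg]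
        omega
      · rename_i h
        have hx : pvRunX l v (i + d) = 0 := by
          apply pvRunX_zero
          intro h2
          exact h ⟨pv_pyGet?_some_lt h2, h2⟩
        omega

-- reference scan: first position c ≤ j < stop with l[j] = -1 and a -1 run of length ≥ dat, else -1
def pvFindF (l : List Int) (stop : Int) (dat : Int) (c : Int) : Int :=
  if h : c < stop then
    if PySem.List.pyGet? l c = some (-1) ∧ dat ≤ pvRunX l (-1) c then c
    else pvFindF l stop dat (c + 1)
  else -1
termination_by (stop - c).toNat
decreasing_by omega

theorem pvFindF_neg (l : List Int) (stop dat c : Int) (h : ¬ c < stop) :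
    pvFindF l stop dat c = -1 := by
  rw [pvFindF]
  simp [h]

theorem pvFindF_skip (l : List Int) (stop dat : Int) :
    ∀ p : Int, PySem.List.pyGet? l p = some (-1) → pvRunX l (-1) p < dat →
      pvFindF l stop dat (p + 1) = pvFindF l stop dat (p + pvRunX l (-1) p) := by
  intro p hg hlt
  have hsucc := pvRunX_succ l (-1) p hg
  have hnn := pvRunX_nonneg l (-1) (p + 1)
  by_cases h1 : 0 < pvRunX l (-1) (p + 1)
  · have hg1 : PySem.List.pyGet? l (p + 1) = some (-1) := pvRunX_pos l (-1) (p + 1) h1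
    by_cases hpi : p + 1 < stop
    · have hcond : ¬ (PySem.List.pyGet? l (p + 1) = some (-1) ∧ dat ≤ pvRunX l (-1) (p + 1)) := by
        rintro ⟨-, h2⟩
        omega
      have step : pvFindF l stop dat (p + 1) = pvFindF l stop dat (p + 1 + 1) := by
        rw [pvFindF]
        simp [hpi, hcond]
      have IH := pvFindF_skip l stop dat (p + 1) hg1 (by omega)
      rw [step, IH]
      congr 1
      omega
    · rw [pvFindF_neg _ _ _ _ hpi, pvFindF_neg]
      omega
  · have : p + pvRunX l (-1) p = p + 1 := by omega
    rw [this]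
termination_by p => (pvRunX l (-1) p).toNat
decreasing_by omega

theorem pvFindLoopA_step_none {l : List Int} {iIns c : Int} {fuel : Nat}
    (h : PySem.List.index? (PySem.List.slice l (some c) (some iIns)) (-1) = none) :
    pvFindLoopA iIns l c (fuel + 1) = -1 := by
  show (match PySem.List.index? (PySem.List.slice l (some c) (some iIns)) (-1) with
        | none => -1
        | some k =>
            if get_length_of_space iIns l > get_length_of_space (c + (k : Int)) l
            then pvFindLoopA iIns l (c + (k : Int) + 1) fuel
            else c + (k : Int)) = -1
  rw [h]

theorem pvFindLoopA_step_some {l : List Int} {iIns c : Int} {k : Nat} {fuel : Nat}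
    (h : PySem.List.index? (PySem.List.slice l (some c) (some iIns)) (-1) = some k) :
    pvFindLoopA iIns l c (fuel + 1) =
      if get_length_of_space iIns l > get_length_of_space (c + (k : Int)) l
      then pvFindLoopA iIns l (c + (k : Int) + 1) fuel else c + (k : Int) := by
  show (match PySem.List.index? (PySem.List.slice l (some c) (some iIns)) (-1) with
        | none => -1
        | some k' =>
            if get_length_of_space iIns l > get_length_of_space (c + (k' : Int)) l
            then pvFindLoopA iIns l (c + (k' : Int) + 1) fuel
            else c + (k' : Int)) = _
  rw [h]

theorem pv_clampIdx_nonneg (n : Nat) (c : Int) (h0 : 0 ≤ c) :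
    PySem.List.clampIdx n c = min c.toNat n := by
  unfold PySem.List.clampIdx
  split_ifs <;> omega

-- the window searched by A's slice l[c:i] is [c, clampIdx len i): empty and cons views
theorem pv_slice_empty (l : List Int) (c i : Int) (hc : 0 ≤ c)
    (h : ((PySem.List.clampIdx l.length i : Nat) : Int) ≤ c) :
    PySem.List.slice l (some c) (some i) = [] := by
  have key : PySem.List.clampIdx l.length i ≤ PySem.List.clampIdx l.length c := by
    have h2 := PySem.List.clampIdx_le l.length i
    rw [pv_clampIdx_nonneg l.length c hc]
    omega
  simp [PySem.List.slice, Nat.sub_eq_zero_of_le key]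

theorem pv_slice_cons (l : List Int) (c i : Int) (hc : 0 ≤ c)
    (hci : c < ((PySem.List.clampIdx l.length i : Nat) : Int)) :
    PySem.List.slice l (some c) (some i) =
      l[c.toNat]'(by have := PySem.List.clampIdx_le l.length i; omega) ::
        PySem.List.slice l (some (c + 1)) (some i) := by
  have hle := PySem.List.clampIdx_le l.length i
  have hcc : PySem.List.clampIdx l.length c = c.toNat := by
    rw [pv_clampIdx_nonneg l.length c hc]
    omega
  have hcc1 : PySem.List.clampIdx l.length (c + 1) = c.toNat + 1 := by
    rw [pv_clampIdx_nonneg l.length (c + 1) (by omega)]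
    omega
  have hlt : c.toNat < l.length := by omega
  simp only [PySem.List.slice, hcc, hcc1]
  rw [List.drop_eq_getElem_cons hlt]
  have h1 : PySem.List.clampIdx l.length i - c.toNat
      = (PySem.List.clampIdx l.length i - (c.toNat + 1)) + 1 := by omega
  rw [h1, List.take_succ_cons]

-- the loop value does not depend on the fuel once the fuel exceeds the remaining scan length
theorem pvFindLoopA_fuel (l : List Int) (iIns : Int) :
    ∀ (c : Int) (f₁ f₂ : Nat), 0 ≤ c → ((l.length : Int) - c).toNat < f₁ →
      ((l.length : Int) - c).toNat < f₂ →
      pvFindLoopA iIns l c f₁ = pvFindLoopA iIns l c f₂ := by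
  intro c f₁ f₂ hc h1 h2
  obtain ⟨a, rfl⟩ : ∃ a, f₁ = a + 1 := ⟨f₁ - 1, by omega⟩
  obtain ⟨b, rfl⟩ : ∃ b, f₂ = b + 1 := ⟨f₂ - 1, by omega⟩
  cases hidx : PySem.List.index? (PySem.List.slice l (some c) (some iIns)) (-1) with
  | none => rw [pvFindLoopA_step_none hidx, pvFindLoopA_step_none hidx]
  | some k =>
      rw [pvFindLoopA_step_some hidx, pvFindLoopA_step_some hidx]
      have hlt := pv_index?_slice_slot_lt hc hidx
      by_cases hcond : get_length_of_space iIns l > get_length_of_space (c + (k : Int)) l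
      · simp only [if_pos hcond]
        exact pvFindLoopA_fuel l iIns (c + (k : Int) + 1) a b (by omega) (by omega) (by omega)
      · simp only [if_neg hcond]
termination_by c _ _ => ((l.length : Int) - c).toNat
decreasing_by omega

theorem pvFindLoopA_eq (l : List Int) (iIns : Int) :
    ∀ (c : Int) (fuel : Nat), 0 ≤ c → ((l.length : Int) - c).toNat < fuel →
      pvFindLoopA iIns l c fuel
        = pvFindF l ((PySem.List.clampIdx l.length iIns : Nat) : Int)
            (get_length_of_space iIns l) c := by
  intro c fuel hc hfuel
  obtain ⟨f, rfl⟩ : ∃ f, fuel = f + 1 := ⟨fuel - 1, by omega⟩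
  have hle := PySem.List.clampIdx_le l.length iIns
  by_cases hci : c < ((PySem.List.clampIdx l.length iIns : Nat) : Int)
  · have hclt : c.toNat < l.length := by omega
    have hgetc : PySem.List.pyGet? l c = some (l[c.toNat]'hclt) :=
      PySem.List.pyGet?_eq_some_getElem l (i := c) hc (by omega)
    have hcons := pv_slice_cons l c iIns hc hci
    by_cases hx : l[c.toNat]'hclt = (-1 : Int)
    · -- the slice starts with -1: the slot found is c itself
      have hidx : PySem.List.index? (PySem.List.slice l (some c) (some iIns)) (-1) = some 0 := by
        rw [hcons, hx]
        exact PySem.List.index?_cons_self _ _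
      have hgc : get_length_of_space c l = pvRunX l (-1) c := by
        unfold get_length_of_space
        rw [hx] at hgetc
        rw [hgetc]
        show pvRunLoopA (-1) l c 0 (2 * l.length + 1) = pvRunX l (-1) c
        rw [pvRunLoopA_eq l (-1) (2 * l.length + 1) c 0 (by omega)]
        omega
      rw [pvFindLoopA_step_some hidx]
      have harg : c + ((0 : Nat) : Int) = c := by simp
      rw [harg]
      conv_rhs => rw [pvFindF]
      rw [hx] at hgetc
      by_cases hd : get_length_of_space iIns l ≤ pvRunX l (-1) c
      · have hcond : PySem.List.pyGet? l c = some (-1) ∧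
            get_length_of_space iIns l ≤ pvRunX l (-1) c := ⟨hgetc, hd⟩
        simp only [hci, dite_true, if_pos hcond, hgc]
        omega
      · have hcond : ¬ (PySem.List.pyGet? l c = some (-1) ∧
            get_length_of_space iIns l ≤ pvRunX l (-1) c) := by
          rintro ⟨-, h2⟩
          exact hd h2
        have IH := pvFindLoopA_eq l iIns (c + 1) f (by omega) (by omega)
        simp only [hci, dite_true, if_neg hcond, hgc]
        rw [if_pos (by omega : get_length_of_space iIns l > pvRunX l (-1) c), IH]
    · -- the head of the slice is not -1: one step of A equals one step of the scan
      have hf : 0 < f := by omega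
      obtain ⟨f', rfl⟩ : ∃ f', f = f' + 1 := ⟨f - 1, by omega⟩
      have key : pvFindLoopA iIns l c (f' + 1 + 1) = pvFindLoopA iIns l (c + 1) (f' + 1) := by
        cases hrest : PySem.List.index? (PySem.List.slice l (some (c + 1)) (some iIns)) (-1) with
        | none =>
            have houter : PySem.List.index? (PySem.List.slice l (some c) (some iIns)) (-1) = none := by
              rw [hcons, PySem.List.index?_cons_of_ne _ hx, hrest]
              rfl
            rw [pvFindLoopA_step_none houter, pvFindLoopA_step_none hrest]
        | some k =>
            have houter : PySem.List.index? (PySem.List.slice l (some c) (some iIns)) (-1)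
                = some (k + 1) := by
              rw [hcons, PySem.List.index?_cons_of_ne _ hx, hrest]
              rfl
            rw [pvFindLoopA_step_some houter, pvFindLoopA_step_some hrest]
            have h1 : c + ((k + 1 : Nat) : Int) = c + 1 + (k : Int) := by push_cast; ring
            rw [h1]
            have hslot := pv_index?_slice_slot_lt (by omega : (0:Int) ≤ c + 1) hrest
            by_cases hcond : get_length_of_space iIns l > get_length_of_space (c + 1 + (k : Int)) l
            · simp only [if_pos hcond]
              exact pvFindLoopA_fuel l iIns (c + 1 + (k : Int) + 1) (f' + 1) f'
                (by omega) (by omega) (by omega)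
            · simp only [if_neg hcond]
      have IH := pvFindLoopA_eq l iIns (c + 1) (f' + 1) (by omega) (by omega)
      rw [key, IH]
      conv_rhs => rw [pvFindF]
      have hcond : ¬ (PySem.List.pyGet? l c = some (-1) ∧
          get_length_of_space iIns l ≤ pvRunX l (-1) c) := by
        rintro ⟨h1, -⟩
        rw [hgetc] at h1
        exact hx (Option.some.inj h1)
      simp only [hci, dite_true, if_neg hcond]
  · -- c at or past the window end: the slice is empty, both sides return -1
    have hempty := pv_slice_empty l c iIns hc (by omega)
    rw [pvFindF_neg _ _ _ _ hci]
    cases hidx : PySem.List.index? (PySem.List.slice l (some c) (some iIns)) (-1) with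
    | none => rw [pvFindLoopA_step_none hidx]
    | some k =>
        rw [hempty] at hidx
        simp [PySem.List.index?_eq_idxOf?] at hidx
termination_by c _ => ((l.length : Int) - c).toNat
decreasing_by
  all_goals omega

-- B's scan with the data length already computed equals the reference scan
theorem pvAltScan_some_eq (l : List Int) (iIns stop : Int) (dat : Int) :
    ∀ (fuel : Nat) (c : Int), 0 ≤ c → (stop - c).toNat < fuel →
      pvAltScan l iIns stop (some dat) c fuel = pvFindF l stop dat c := by
  intro fuel c hc hfuel
  obtain ⟨f, rfl⟩ : ∃ f, fuel = f + 1 := ⟨fuel - 1, by omega⟩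
  show (if c < stop then
          if PySem.List.pyGet? l c ≠ some (-1) then pvAltScan l iIns stop (some dat) (c + 1) f
          else
            if dat ≤ pvAltRunLen l (-1) c 1 (2 * l.length + 1) then c
            else pvAltScan l iIns stop (some dat) (c + pvAltRunLen l (-1) c 1 (2 * l.length + 1)) f
        else -1) = pvFindF l stop dat c
  rw [pvFindF]
  by_cases hci : c < stop
  · by_cases hg : PySem.List.pyGet? l c = some (-1)
    · have hclt := pv_pyGet?_some_lt hg
      have hcge := pv_pyGet?_some_ge hg
      have hsucc := pvRunX_succ l (-1) c hg
      have hL : pvAltRunLen l (-1) c 1 (2 * l.length + 1) = pvRunX l (-1) c := by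
        rw [pvAltRunLen_eq l (-1) (2 * l.length + 1) c 1 (by omega), hsucc]
      by_cases hd : dat ≤ pvRunX l (-1) c
      · simp [hci, hg, hL, hd]
      · have hXpos : 0 < pvRunX l (-1) c := by
          have := pvRunX_nonneg l (-1) (c + 1)
          omega
        have IH := pvAltScan_some_eq l iIns stop dat f (c + pvRunX l (-1) c) (by omega) (by omega)
        have hskip := pvFindF_skip l stop dat c hg (by omega)
        simp only [hci, if_true, dite_true, hg, hL, hd, ne_eq, not_true_eq_false, if_false]
        rw [IH, ← hskip]
        simp
    · have IH := pvAltScan_some_eq l iIns stop dat f (c + 1) (by omega) (by omega)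
      simp only [hci, dite_true, if_pos (by simp [hg] : PySem.List.pyGet? l c ≠ some (-1))]
      rw [IH]
      have hcond : ¬ (PySem.List.pyGet? l c = some (-1) ∧ dat ≤ pvRunX l (-1) c) := by
        rintro ⟨h1, -⟩
        exact hg h1
      simp [hcond]
  · simp [hci]
termination_by _ c => (stop - c).toNat
decreasing_by
  all_goals omega

-- B's scan before the data length is first needed: once a slot appears it materialises the
-- data length and proceeds exactly like the eager scan
theorem pvAltScan_none_eq (l : List Int) (iIns stop : Int) {val : Int}
    (hval : PySem.List.pyGet? l iIns = some val) :
    ∀ (fuel : Nat) (c : Int), 0 ≤ c → (stop - c).toNat < fuel →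
      pvAltScan l iIns stop none c fuel
        = pvFindF l stop (pvAltRunLen l val iIns 1 (2 * l.length + 1)) c := by
  intro fuel c hc hfuel
  obtain ⟨f, rfl⟩ : ∃ f, fuel = f + 1 := ⟨fuel - 1, by omega⟩
  show (if c < stop then
          if PySem.List.pyGet? l c ≠ some (-1) then pvAltScan l iIns stop none (c + 1) f
          else
            match PySem.List.pyGet? l iIns with
            | none => 0
            | some val' =>
                if pvAltRunLen l val' iIns 1 (2 * l.length + 1) ≤ pvAltRunLen l (-1) c 1 (2 * l.length + 1) then c
                else pvAltScan l iIns stop (some (pvAltRunLen l val' iIns 1 (2 * l.length + 1)))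
                  (c + pvAltRunLen l (-1) c 1 (2 * l.length + 1)) f
        else -1)
      = pvFindF l stop (pvAltRunLen l val iIns 1 (2 * l.length + 1)) c
  rw [pvFindF]
  by_cases hci : c < stop
  · by_cases hg : PySem.List.pyGet? l c = some (-1)
    · have hclt := pv_pyGet?_some_lt hg
      have hcge := pv_pyGet?_some_ge hg
      have hsucc := pvRunX_succ l (-1) c hg
      have hL : pvAltRunLen l (-1) c 1 (2 * l.length + 1) = pvRunX l (-1) c := by
        rw [pvAltRunLen_eq l (-1) (2 * l.length + 1) c 1 (by omega), hsucc]
      rw [hval]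
      by_cases hd : pvAltRunLen l val iIns 1 (2 * l.length + 1) ≤ pvRunX l (-1) c
      · simp [hci, hg, hL, hd]
      · have hXpos : 0 < pvRunX l (-1) c := by
          have := pvRunX_nonneg l (-1) (c + 1)
          omega
        have IH := pvAltScan_some_eq l iIns stop (pvAltRunLen l val iIns 1 (2 * l.length + 1)) f
          (c + pvRunX l (-1) c) (by omega) (by omega)
        have hskip := pvFindF_skip l stop (pvAltRunLen l val iIns 1 (2 * l.length + 1)) c hg (by omega)
        simp only [hci, if_true, dite_true, hg, hL, hd, ne_eq, not_true_eq_false, if_false]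
        rw [IH, ← hskip]
        simp
    · have IH := pvAltScan_none_eq l iIns stop hval f (c + 1) (by omega) (by omega)
      simp only [hci, dite_true, if_pos (by simp [hg] : PySem.List.pyGet? l c ≠ some (-1))]
      rw [IH]
      have hcond : ¬ (PySem.List.pyGet? l c = some (-1) ∧
          pvAltRunLen l val iIns 1 (2 * l.length + 1) ≤ pvRunX l (-1) c) := by
        rintro ⟨h1, -⟩
        exact hg h1
      simp [hcond]
  · simp [hci]
termination_by _ c => (stop - c).toNat
decreasing_by
  all_goals omega

-- B's scan returns -1 when no position of the window holds -1 (the data length is never needed)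
theorem pvAltScan_no_slot (l : List Int) (iIns stop : Int) :
    ∀ (fuel : Nat) (c : Int), 0 ≤ c → (stop - c).toNat < fuel →
      (∀ j : Int, c ≤ j → j < stop → PySem.List.pyGet? l j ≠ some (-1)) →
      pvAltScan l iIns stop none c fuel = -1 := by
  intro fuel c hc hfuel hno
  obtain ⟨f, rfl⟩ : ∃ f, fuel = f + 1 := ⟨fuel - 1, by omega⟩
  show (if c < stop then
          if PySem.List.pyGet? l c ≠ some (-1) then pvAltScan l iIns stop none (c + 1) f
          else
            match PySem.List.pyGet? l iIns with
            | none => 0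
            | some val' =>
                if pvAltRunLen l val' iIns 1 (2 * l.length + 1) ≤ pvAltRunLen l (-1) c 1 (2 * l.length + 1) then c
                else pvAltScan l iIns stop (some (pvAltRunLen l val' iIns 1 (2 * l.length + 1)))
                  (c + pvAltRunLen l (-1) c 1 (2 * l.length + 1)) f
        else -1) = -1
  by_cases hci : c < stop
  · have hg : PySem.List.pyGet? l c ≠ some (-1) := hno c (le_refl c) hci
    have IH := pvAltScan_no_slot l iIns stop f (c + 1) (by omega) (by omega)
      (fun j h1 h2 => hno j (by omega) h2)
    simp only [hci, if_true, if_pos hg]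
    exact IH
  · simp [hci]
termination_by _ c => (stop - c).toNat
decreasing_by omega

-- every position of the window [0, stop) is an element of the slice l[0:i]
theorem pv_window_mem (l : List Int) (i : Int) {j v : Int} (hj : 0 ≤ j)
    (hlt : j < ((PySem.List.clampIdx l.length i : Nat) : Int))
    (hget : PySem.List.pyGet? l j = some v) :
    v ∈ PySem.List.slice l (some 0) (some i) := by
  have hle := PySem.List.clampIdx_le l.length i
  have hjl : j.toNat < l.length := by omega
  have hv : v = l[j.toNat]'hjl := by
    have h2 := PySem.List.pyGet?_eq_some_getElem l (i := j) hj (by omega)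
    rw [hget] at h2
    exact Option.some.inj h2
  have h0 : PySem.List.clampIdx l.length 0 = 0 := by
    rw [pv_clampIdx_nonneg l.length 0 (le_refl 0)]
    omega
  show v ∈ List.take (PySem.List.clampIdx l.length i - PySem.List.clampIdx l.length 0)
      (List.drop (PySem.List.clampIdx l.length 0) l)
  rw [h0]
  simp only [Nat.sub_zero, List.drop_zero]
  subst hv
  apply List.mem_iff_getElem.mpr
  refine ⟨j.toNat, by simp; omega, ?_⟩
  simp [List.getElem_take]

-- ===== VERDICT (by name: the statement is the Claim_ definition above) =====
theorem find_free_space_spec : Claim_equal_find_free_space := by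
  intro i l _ hPre
  unfold Spec_find_free_space find_free_space find_free_space_alt
  have hle := PySem.List.clampIdx_le l.length i
  show pvFindLoopA i l 0 (l.length + 1)
      = pvAltScan l i (if 0 ≤ i then min i (l.length : Int) else (l.length : Int) + i) none 0
          ((if 0 ≤ i then min i (l.length : Int) else (l.length : Int) + i).toNat + 1)
  by_cases hin : -(l.length : Int) ≤ i ∧ i < (l.length : Int)
  · -- the index is in range: both sides reduce to the reference scan over the same window
    obtain ⟨v, hv⟩ : ∃ v, PySem.List.pyGet? l i = some v := by
      cases hg : PySem.List.pyGet? l i with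
      | none =>
          rw [PySem.List.pyGet?_eq_none_iff] at hg
          unfold PySem.Raise.InRange at hg
          omega
      | some v => exact ⟨v, rfl⟩
    have hstop : (if 0 ≤ i then min i (l.length : Int) else (l.length : Int) + i)
        = ((PySem.List.clampIdx l.length i : Nat) : Int) := by
      by_cases h0 : 0 ≤ i
      · rw [if_pos h0, pv_clampIdx_nonneg l.length i h0]
        push_cast
        omega
      · rw [if_neg h0]
        unfold PySem.List.clampIdx
        split_ifs <;> omega
    rw [hstop]
    rw [pvFindLoopA_eq l i 0 (l.length + 1) (le_refl 0) (by omega)]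
    rw [pvAltScan_none_eq l i _ hv
        (((PySem.List.clampIdx l.length i : Nat) : Int).toNat + 1) 0 (le_refl 0) (by omega)]
    have hdat : get_length_of_space i l = pvAltRunLen l v i 1 (2 * l.length + 1) := by
      unfold get_length_of_space
      rw [hv]
      show pvRunLoopA v l i 0 (2 * l.length + 1) = _
      rw [pvRunLoopA_eq l v (2 * l.length + 1) i 0 (by omega),
          pvAltRunLen_eq l v (2 * l.length + 1) i 1 (by omega),
          pvRunX_succ l v i hv]
      omega
    rw [hdat]
  · -- the index is out of range: Pre_ says the window holds no -1, so both sides return -1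
    have hno : (-1 : Int) ∉ PySem.List.slice l (some 0) (some i) := by
      cases hPre with
      | inl h => exact absurd h hin
      | inr h => exact h
    have hidx : PySem.List.index? (PySem.List.slice l (some 0) (some i)) (-1) = none := by
      rw [PySem.List.index?_eq_none_iff]
      exact hno
    have hSE : (if 0 ≤ i then min i (l.length : Int) else (l.length : Int) + i)
        ≤ ((PySem.List.clampIdx l.length i : Nat) : Int) := by
      by_cases h0 : 0 ≤ i
      · rw [if_pos h0, pv_clampIdx_nonneg l.length i h0]
        push_cast
        omega
      · rw [if_neg h0]
        unfold PySem.List.clampIdx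
        split_ifs <;> omega
    have hB := pvAltScan_no_slot l i
      (if 0 ≤ i then min i (l.length : Int) else (l.length : Int) + i)
      ((if 0 ≤ i then min i (l.length : Int) else (l.length : Int) + i).toNat + 1) 0
      (le_refl 0) (by omega)
      (by
        intro j h1 h2 hg
        exact hno (pv_window_mem l i h1 (by omega) hg))
    rw [hB, pvFindLoopA_step_none (fuel := l.length) hidx]
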